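-- pv_equiv track=rewrite | github.com/algorand/py-algorand-sdk | algosdk/mnemonic.py | _to_11_bit
-- ===== SOURCE A (Python) =====
-- def _to_11_bit(data):
--     """
--     Convert a bytearray to an list of 11-bit numbers.
--
--     Args:
--         data (bytes): bytearray to convert to 11-bit numbers
--
--     Returns:
--         int[]: list of 11-bit numbers
--     """
--     buffer = 0
--     num_of_bits = 0
--     output = []
--     for i in range(len(data)):
--         buffer |= data[i] << num_of_bits
--         num_of_bits += 8
--         if num_of_bits >= 11:
--             output.append(buffer & 2047)
--             buffer = buffer >> 11
--             num_of_bits -= 11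
--     if num_of_bits != 0:
--         output.append(buffer & 2047)
--     return output
-- ===== SOURCE B (Python) =====
-- def _to_11_bit(data):
--     num = 0
--     for i in range(len(data)):
--         num |= data[i] << (8 * i)
--     count = (len(data) * 8 + 10) // 11
--     return [(num >> (11 * j)) & 2047 for j in range(count)]
-- ===== Notes on version B (the rewrite author's own statement) =====
-- stated objective: simpler
-- what changed: Replaces the per-byte buffer/bit-counter state machine with conditional chunk emission by a whole-value computation: OR every byte into one big integer at its 8-bit offset, then read out ceil(8*len/11) chunks directly as (num >> 11*j) & 2047; clearer but slower on large inputs.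
import Mathlib
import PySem

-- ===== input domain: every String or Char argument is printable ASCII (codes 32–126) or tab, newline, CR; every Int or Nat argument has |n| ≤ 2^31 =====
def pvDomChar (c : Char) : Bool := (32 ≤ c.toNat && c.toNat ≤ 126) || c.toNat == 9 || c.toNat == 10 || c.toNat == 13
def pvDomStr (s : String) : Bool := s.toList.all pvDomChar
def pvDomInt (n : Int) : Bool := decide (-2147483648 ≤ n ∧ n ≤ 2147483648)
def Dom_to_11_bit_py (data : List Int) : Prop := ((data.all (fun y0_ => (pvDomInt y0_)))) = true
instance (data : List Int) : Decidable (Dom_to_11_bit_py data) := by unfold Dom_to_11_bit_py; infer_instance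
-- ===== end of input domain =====

-- B replaces A's per-byte buffer/bit-counter state machine by one big OR-accumulated integer
-- read out in ceil(8*len/11) mask-and-shift chunks (objective: simpler); equal on every input.

-- ===== PORT A =====
-- one iteration of A's for-loop over (buffer, num_of_bits, output)
def to11Step (st : Int × Nat × List Int) (d : Int) : Int × Nat × List Int :=
  let buffer := PySem.Int.bor st.1 (d <<< st.2.1)
  let n := st.2.1 + 8
  if 11 ≤ n then (buffer >>> (11 : Nat), n - 11, st.2.2 ++ [PySem.Int.band buffer 2047])
  else (buffer, n, st.2.2)

-- A's trailing 'if num_of_bits != 0' append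
def to11Fin (s : Int × Nat × List Int) : List Int :=
  if s.2.1 ≠ 0 then s.2.2 ++ [PySem.Int.band s.1 2047] else s.2.2

def to_11_bit_py (data : List Int) : List Int :=
  to11Fin (data.foldl to11Step (0, 0, []))

-- ===== PORT B =====
-- B's first loop: num |= data[i] << (8*i)
def altOr : Nat → Int → List Int → Int
  | _, num, [] => num
  | i, num, d :: rest => altOr (i + 1) (PySem.Int.bor num (d <<< (8 * i))) rest

-- B's comprehension: [(num >> 11*j) & 2047 for j in range(count)]
def to_11_bit_py_alt (data : List Int) : List Int :=
  (List.range ((data.length * 8 + 10) / 11)).map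
    (fun (j : Nat) => PySem.Int.band (altOr 0 0 data >>> (11 * j)) 2047)

-- ===== PRECONDITION & SPEC =====
def Spec_to_11_bit_py (data : List Int) (out : List Int) : Prop := out = to_11_bit_py_alt data
instance (data : List Int) (out : List Int) : Decidable (Spec_to_11_bit_py data out) := by unfold Spec_to_11_bit_py; infer_instance

-- ===== CLAIM (what is proved, stated in full; the proofs are below) =====
def Claim_equal_to_11_bit_py : Prop := ∀ (data : List Int), Dom_to_11_bit_py data → Spec_to_11_bit_py data (to_11_bit_py data)

-- ===== LEMMAS AND PROOFS =====

-- ### Nat-level bit facts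

-- clearing a submask is `Nat.ldiff`
theorem natSubAnd (y : Nat) : ∀ x : Nat, y - (y &&& x) = Nat.ldiff y x := by
  induction y using Nat.strong_induction_on with
  | _ y ih =>
    intro x
    cases y with
    | zero =>
      have h0 : Nat.ldiff 0 x = 0 := by
        apply Nat.eq_of_testBit_eq
        intro i
        simp [Nat.testBit_ldiff, Nat.zero_testBit]
      simp [h0]
    | succ n =>
      have hy2 : (n + 1) / 2 < n + 1 := by omega
      have hbit : ∀ m : Nat, Nat.bit (decide (m % 2 = 1)) (m / 2) = m := by
        intro m
        rcases Nat.mod_two_eq_zero_or_one m with h0 | h1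
        · simp [Nat.bit, h0]; omega
        · simp [Nat.bit, h1]; omega
      conv_lhs => rw [← hbit (n + 1), ← hbit x]
      conv_rhs => rw [← hbit (n + 1), ← hbit x]
      rw [Nat.land_bit, Nat.ldiff_bit]
      have hle := Nat.and_le_left (n := (n + 1) / 2) (m := x / 2)
      have := ih ((n + 1) / 2) hy2 (x / 2)
      rcases Nat.mod_two_eq_zero_or_one (n + 1) with h0 | h0 <;>
        rcases Nat.mod_two_eq_zero_or_one x with g0 | g0 <;>
          simp [Nat.bit, h0, g0] <;> omega

theorem natOrShr (x y k : Nat) : (x ||| y) >>> k = (x >>> k) ||| (y >>> k) := by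
  apply Nat.eq_of_testBit_eq
  intro i
  simp [Nat.testBit_shiftRight, Nat.testBit_lor]

theorem natAndShr (x y k : Nat) : (x &&& y) >>> k = (x >>> k) &&& (y >>> k) := by
  apply Nat.eq_of_testBit_eq
  intro i
  simp [Nat.testBit_shiftRight, Nat.testBit_land]

theorem natLdiffShr (x y k : Nat) : (Nat.ldiff x y) >>> k = Nat.ldiff (x >>> k) (y >>> k) := by
  apply Nat.eq_of_testBit_eq
  intro i
  simp [Nat.testBit_shiftRight, Nat.testBit_ldiff]

theorem nat2047 : (2047 : Nat) = 2 ^ 11 - 1 := by norm_num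

theorem natT2047 (i : Nat) : (2047 : Nat).testBit i = decide (i < 11) := by
  rw [nat2047]
  exact Nat.testBit_two_pow_sub_one 11 i

-- ### PySem.Int.bor / band on the two sign shapes

theorem borNS (x y : Nat) : PySem.Int.bor (x : Int) (Int.negSucc y) = Int.negSucc (Nat.ldiff y x) := by
  have h1 : ¬ (0 : Int) ≤ Int.negSucc y := by simp [Int.negSucc_eq]; try omega
  have h2 : (-(Int.negSucc y) - 1).toNat = y := by simp [Int.negSucc_eq]; try omega
  simp [PySem.Int.bor, h1, h2, natSubAnd, Int.negSucc_eq]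
  try omega

theorem borSN (x y : Nat) : PySem.Int.bor (Int.negSucc x) (y : Int) = Int.negSucc (Nat.ldiff x y) := by
  have h1 : ¬ (0 : Int) ≤ Int.negSucc x := by simp [Int.negSucc_eq]; try omega
  have h2 : (-(Int.negSucc x) - 1).toNat = x := by simp [Int.negSucc_eq]; try omega
  simp [PySem.Int.bor, h1, h2, natSubAnd, Int.negSucc_eq]
  try omega

theorem borSS (x y : Nat) : PySem.Int.bor (Int.negSucc x) (Int.negSucc y) = Int.negSucc (x &&& y) := by
  have h1 : ¬ (0 : Int) ≤ Int.negSucc x := by simp [Int.negSucc_eq]; try omega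
  have h1' : ¬ (0 : Int) ≤ Int.negSucc y := by simp [Int.negSucc_eq]; try omega
  have h2 : (-(Int.negSucc x) - 1).toNat = x := by simp [Int.negSucc_eq]; try omega
  have h2' : (-(Int.negSucc y) - 1).toNat = y := by simp [Int.negSucc_eq]; try omega
  simp [PySem.Int.bor, h1, h1', h2, h2', Int.negSucc_eq]
  try omega

theorem bandN2047 (x : Nat) : PySem.Int.band (x : Int) 2047 = ((x &&& 2047 : Nat) : Int) := by
  rw [show (2047 : Int) = ((2047 : Nat) : Int) by norm_num, PySem.Int.band_natCast]

theorem bandS2047 (x : Nat) :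
    PySem.Int.band (Int.negSucc x) 2047 = ((Nat.ldiff 2047 x : Nat) : Int) := by
  have h1 : ¬ (0 : Int) ≤ Int.negSucc x := by simp [Int.negSucc_eq]; try omega
  have h2 : (-(Int.negSucc x) - 1).toNat = x := by simp [Int.negSucc_eq]; try omega
  simp [PySem.Int.band, h1, h2, natSubAnd]

theorem shrNegSucc (x : Nat) (k : Nat) : (Int.negSucc x) >>> k = Int.negSucc (x >>> k) := rfl

theorem shrOfNat (x : Nat) (k : Nat) : ((x : Int)) >>> k = ((x >>> k : Nat) : Int) := rfl

-- ### Int-level facts used by the loop correspondence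

-- right shift distributes over Python's `|`
theorem borShr (a b : Int) (k : Nat) :
    (PySem.Int.bor a b) >>> k = PySem.Int.bor (a >>> k) (b >>> k) := by
  cases a with
  | ofNat x =>
    cases b with
    | ofNat y =>
      simp only [Int.ofNat_eq_natCast]
      rw [PySem.Int.bor_natCast, shrOfNat, shrOfNat, shrOfNat, PySem.Int.bor_natCast, natOrShr]
    | negSucc y =>
      simp only [Int.ofNat_eq_natCast]
      rw [borNS, shrNegSucc, shrOfNat, shrNegSucc, borNS, natLdiffShr]
  | negSucc x =>
    cases b with
    | ofNat y =>
      simp only [Int.ofNat_eq_natCast]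
      rw [borSN, shrNegSucc, shrNegSucc, shrOfNat, borSN, natLdiffShr]
    | negSucc y =>
      rw [borSS, shrNegSucc, shrNegSucc, shrNegSucc, borSS, natAndShr]

-- OR-ing in a value with zero low 11 bits does not change the low 11 bits
theorem borLow (a b : Int) (hb : PySem.Int.band b 2047 = 0) :
    PySem.Int.band (PySem.Int.bor a b) 2047 = PySem.Int.band a 2047 := by
  cases b with
  | ofNat y =>
    rw [Int.ofNat_eq_natCast, bandN2047] at hb
    have hb' : (y &&& 2047 : Nat) = 0 := by exact_mod_cast hb
    have hy : ∀ i, i < 11 → y.testBit i = false := by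
      intro i hi
      have ht := congrArg (fun t => t.testBit i) hb'
      simpa [Nat.testBit_land, natT2047, hi] using ht
    cases a with
    | ofNat x =>
      simp only [Int.ofNat_eq_natCast]
      rw [PySem.Int.bor_natCast, bandN2047, bandN2047]
      congr 1
      apply Nat.eq_of_testBit_eq
      intro i
      by_cases hi : i < 11
      · simp [Nat.testBit_land, Nat.testBit_lor, natT2047, hi, hy i hi]
      · simp [Nat.testBit_land, Nat.testBit_lor, natT2047, hi]
    | negSucc x =>
      simp only [Int.ofNat_eq_natCast]
      rw [borSN, bandS2047, bandS2047]
      congr 1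
      apply Nat.eq_of_testBit_eq
      intro i
      by_cases hi : i < 11
      · simp [Nat.testBit_ldiff, natT2047, hi, hy i hi]
      · simp [Nat.testBit_ldiff, natT2047, hi]
  | negSucc y =>
    rw [bandS2047] at hb
    have hb' : (Nat.ldiff 2047 y : Nat) = 0 := by exact_mod_cast hb
    have hy : ∀ i, i < 11 → y.testBit i = true := by
      intro i hi
      have ht := congrArg (fun t => t.testBit i) hb'
      simpa [Nat.testBit_ldiff, natT2047, hi] using ht
    cases a with
    | ofNat x =>
      simp only [Int.ofNat_eq_natCast]
      rw [borNS, bandS2047, bandN2047]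
      congr 1
      apply Nat.eq_of_testBit_eq
      intro i
      by_cases hi : i < 11
      · simp [Nat.testBit_land, Nat.testBit_ldiff, natT2047, hi, hy i hi]
      · simp [Nat.testBit_land, Nat.testBit_ldiff, natT2047, hi]
    | negSucc x =>
      rw [borSS, bandS2047, bandS2047]
      congr 1
      apply Nat.eq_of_testBit_eq
      intro i
      by_cases hi : i < 11
      · simp [Nat.testBit_land, Nat.testBit_ldiff, natT2047, hi, hy i hi]
      · simp [Nat.testBit_land, Nat.testBit_ldiff, natT2047, hi]

-- Python's >> is floor division by a power of two
theorem shrEq (x : Int) (k : Nat) : x >>> k = x / ((2 : Int) ^ k) := by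
  cases x with
  | ofNat m =>
    rw [show (Int.ofNat m) = ((m : Nat) : Int) from rfl, shrOfNat, Nat.shiftRight_eq_div_pow,
      Int.natCast_div]
    push_cast
    norm_num
  | negSucc m =>
    rw [shrNegSucc, Nat.shiftRight_eq_div_pow]
    have hq := Nat.div_add_mod m (2 ^ k)
    have hlt : (↑(m % 2 ^ k) : Int) < 2 ^ k := by
      exact_mod_cast Nat.mod_lt _ (by positivity : 0 < 2 ^ k)
    have hr0 : (0 : Int) ≤ ↑(m % 2 ^ k) := Int.natCast_nonneg _
    have hcast : (m : Int) = (2 : Int) ^ k * ↑(m / 2 ^ k) + ↑(m % 2 ^ k) := by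
      exact_mod_cast hq.symm
    have hrepr : (Int.negSucc m)
        = ((2 ^ k - 1 - (↑(m % 2 ^ k) : Int)) + (2 : Int) ^ k * (-(↑(m / 2 ^ k)) - 1)) := by
      rw [Int.negSucc_eq, hcast]
      ring
    rw [hrepr, Int.add_mul_ediv_left _ _ (by positivity : ((2 : Int) ^ k) ≠ 0),
      Int.ediv_eq_zero_of_lt (by linarith) (by linarith), Int.negSucc_eq]
    ring

-- shifting a left shift right by k ≤ s keeps a left shift
theorem shlShr (d : Int) (s k : Nat) (h : k ≤ s) : (d <<< s) >>> k = d <<< (s - k) := by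
  rw [Int.shiftLeft_eq, Int.shiftLeft_eq, shrEq]
  have hs : (2 : Int) ^ s = 2 ^ (s - k) * 2 ^ k := by
    rw [← pow_add]
    congr 1
    omega
  rw [hs, ← mul_assoc]
  exact Int.mul_ediv_cancel _ (by positivity)

-- Python's & 2047 is mod 2048
theorem bandEmod (x : Int) : PySem.Int.band x 2047 = x % 2048 := by
  cases x with
  | ofNat m =>
    simp only [Int.ofNat_eq_natCast]
    rw [bandN2047]
    have h1 : m &&& 2047 = m % 2048 := by
      have := Nat.and_two_pow_sub_one_eq_mod m 11
      norm_num at this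
      simpa using this
    rw [h1]
    omega
  | negSucc m =>
    rw [bandS2047, ← natSubAnd]
    have h1 : 2047 &&& m = m % 2048 := by
      rw [Nat.and_comm]
      have := Nat.and_two_pow_sub_one_eq_mod m 11
      norm_num at this
      simpa using this
    rw [h1, Int.negSucc_eq]
    omega

-- a value shifted left by at least 11 has zero low 11 bits
theorem shlBand (d : Int) (s : Nat) (h : 11 ≤ s) : PySem.Int.band (d <<< s) 2047 = 0 := by
  rw [bandEmod, Int.shiftLeft_eq]
  have hs : (2 : Int) ^ s = 2048 * 2 ^ (s - 11) := by
    rw [show (2048 : Int) = 2 ^ 11 by norm_num, ← pow_add]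
    congr 1
    omega
  rw [hs]
  exact Int.emod_eq_zero_of_dvd ⟨d * 2 ^ (s - 11), by ring⟩

theorem shrAdd (x : Int) (n k : Nat) : x >>> (n + k) = (x >>> n) >>> k := by
  cases x with
  | ofNat m =>
    rw [show (Int.ofNat m) = ((m : Nat) : Int) from rfl, shrOfNat, shrOfNat, shrOfNat,
      Nat.shiftRight_add]
  | negSucc m => rw [shrNegSucc, shrNegSucc, shrNegSucc, Nat.shiftRight_add]

-- ### the combined big number of A's pass, with helpers

-- the OR of the pending values, each at its bit offset
def mixNum : Int → Nat → List Int → Int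
  | buf, _, [] => buf
  | buf, s, d :: rest => mixNum (PySem.Int.bor buf (d <<< s)) (s + 8) rest

theorem altOr_eq_mixNum (data : List Int) : ∀ (i : Nat) (num : Int),
    altOr i num data = mixNum num (8 * i) data := by
  induction data with
  | nil => intro i num; rfl
  | cons d rest ih =>
    intro i num
    show altOr (i + 1) (PySem.Int.bor num (d <<< (8 * i))) rest
        = mixNum (PySem.Int.bor num (d <<< (8 * i))) (8 * i + 8) rest
    rw [ih (i + 1), show 8 * (i + 1) = 8 * i + 8 from by omega]

theorem mixNum_band (rest : List Int) : ∀ (buf : Int) (s : Nat), 11 ≤ s →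
    PySem.Int.band (mixNum buf s rest) 2047 = PySem.Int.band buf 2047 := by
  induction rest with
  | nil => intro buf s _; rfl
  | cons d r ih =>
    intro buf s hs
    show PySem.Int.band (mixNum (PySem.Int.bor buf (d <<< s)) (s + 8) r) 2047 = _
    rw [ih _ _ (by omega), borLow _ _ (shlBand d s hs)]

theorem mixNum_shr (rest : List Int) : ∀ (buf : Int) (s : Nat), 11 ≤ s →
    (mixNum buf s rest) >>> (11 : Nat) = mixNum (buf >>> (11 : Nat)) (s - 11) rest := by
  induction rest with
  | nil => intro buf s _; rfl
  | cons d r ih =>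
    intro buf s hs
    show (mixNum (PySem.Int.bor buf (d <<< s)) (s + 8) r) >>> (11 : Nat) = _
    rw [ih _ _ (by omega), borShr, shlShr d s 11 (by omega),
      show s + 8 - 11 = s - 11 + 8 from by omega]
    rfl

theorem shr_zero (x : Int) : x >>> (0 : Nat) = x := by
  cases x with
  | ofNat m => rfl
  | negSucc m => rfl

-- peel one 11-bit chunk off the comprehension
theorem chunk_succ (c : Nat) (x : Int) :
    (List.range (c + 1)).map (fun (j : Nat) => PySem.Int.band (x >>> (11 * j)) 2047)
      = PySem.Int.band x 2047
        :: (List.range c).map (fun (j : Nat) => PySem.Int.band ((x >>> (11 : Nat)) >>> (11 * j)) 2047) := by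
  rw [List.range_succ_eq_map, List.map_cons, List.map_map]
  congr 1
  · rw [show 11 * 0 = 0 from rfl, shr_zero]
  · apply List.map_congr_left
    intro j _
    show PySem.Int.band (x >>> (11 * (j + 1))) 2047 = _
    rw [show 11 * (j + 1) = 11 + 11 * j from by omega, shrAdd]

-- A's loop from any reachable state produces B's chunk list of the combined number
theorem to11_main : ∀ (data : List Int) (buf : Int) (bits : Nat) (out : List Int), bits ≤ 10 →
    to11Fin (data.foldl to11Step (buf, bits, out)) =
      out ++ (List.range ((bits + 8 * data.length + 10) / 11)).map
        (fun (j : Nat) => PySem.Int.band ((mixNum buf bits data) >>> (11 * j)) 2047) := by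
  intro data
  induction data with
  | nil =>
    intro buf bits out hbits
    simp only [List.foldl_nil, List.length_nil, mixNum, to11Fin]
    by_cases h0 : bits = 0
    · subst h0
      norm_num
    · have hc : (bits + 8 * 0 + 10) / 11 = 1 := by omega
      rw [hc, chunk_succ]
      simp [h0]
  | cons d rest ih =>
    intro buf bits out hbits
    simp only [List.foldl_cons, to11Step]
    by_cases hcase : 11 ≤ bits + 8
    · simp only [if_pos hcase]
      rw [ih _ _ _ (by omega)]
      have hcnt : (bits + 8 * (d :: rest).length + 10) / 11
          = (bits + 8 - 11 + 8 * rest.length + 10) / 11 + 1 := by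
        simp only [List.length_cons]
        omega
      rw [hcnt, chunk_succ]
      show (out ++ [PySem.Int.band (PySem.Int.bor buf (d <<< bits)) 2047]) ++ _ = _
      rw [show mixNum buf bits (d :: rest)
          = mixNum (PySem.Int.bor buf (d <<< bits)) (bits + 8) rest from rfl,
        mixNum_band rest _ _ hcase, mixNum_shr rest _ _ hcase, List.append_assoc]
      rfl
    · simp only [if_neg hcase]
      rw [ih _ _ _ (by omega)]
      show _ = out ++ (List.range ((bits + 8 * (d :: rest).length + 10) / 11)).map _
      rw [show mixNum buf bits (d :: rest)
          = mixNum (PySem.Int.bor buf (d <<< bits)) (bits + 8) rest from rfl,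
        show (bits + 8 * (d :: rest).length + 10) / 11 = (bits + 8 + 8 * rest.length + 10) / 11
          from by simp only [List.length_cons]; omega]

-- ===== VERDICT (by name: the statement is the Claim_ definition above) =====
theorem to_11_bit_py_spec : Claim_equal_to_11_bit_py := by
  intro data _
  unfold Spec_to_11_bit_py to_11_bit_py to_11_bit_py_alt
  rw [to11_main data 0 0 [] (by norm_num), altOr_eq_mixNum data 0 0,
    show 8 * 0 = 0 from rfl]
  simp only [List.nil_append]
  congr 2
  omega
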